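-- pv_equiv track=rewrite | github.com/lin-ao/AdventOfCode | 2022/day_06.py | get_marker
-- ===== SOURCE A (Python) =====
-- def get_marker(stream: str, number: int=4) -> int:
--     stack = []
--     for index, char in enumerate(stream):
--         if len(stack) == number:
--             return index
--         elif char in stack:
--             stack = stack[stack.index(char)+1:]
--             stack.append(char)
--         else:
--             stack.append(char)
--     else:
--         return -1
-- ===== SOURCE B (Python) =====
-- def get_marker(stream: str, number: int = 4) -> int:
--     last = {}
--     start = 0
--     for index, char in enumerate(stream):
--         if index - start == number:
--             return index
--         prev = last.get(char, -1)
--         if prev >= start: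
--             start = prev + 1
--         last[char] = index
--     return -1
-- ===== Notes on version B (the rewrite author's own statement) =====
-- stated objective: alternative
-- what changed: Replaced A's explicit stack list (per-step linear 'char in stack' membership test, list.index scan and slicing) by a sliding-window scan keeping only a window-start pointer and a dict of each character's last-seen index.
import Mathlib
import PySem

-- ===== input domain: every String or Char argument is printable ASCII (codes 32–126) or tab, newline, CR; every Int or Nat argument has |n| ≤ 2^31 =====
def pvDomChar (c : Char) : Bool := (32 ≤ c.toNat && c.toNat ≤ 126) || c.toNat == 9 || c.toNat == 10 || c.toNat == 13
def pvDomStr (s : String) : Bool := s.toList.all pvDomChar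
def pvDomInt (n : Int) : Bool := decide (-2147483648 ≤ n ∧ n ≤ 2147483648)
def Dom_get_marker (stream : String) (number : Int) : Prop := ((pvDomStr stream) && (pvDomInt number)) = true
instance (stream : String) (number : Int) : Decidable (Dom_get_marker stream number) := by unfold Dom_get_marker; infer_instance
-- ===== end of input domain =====

-- B replaces A's stack list (linear membership test, .index scan and slice per step)
-- by a sliding-window start pointer plus a last-seen-index dict (an alternative algorithm).

-- ===== PORT A =====
-- the for/enumerate loop of A, carrying the stack; returns -1 when the loop ends (the for/else)
def getMarkerLoopA (number : Int) : List (Int × Char) → List Char → Int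
  | [], _ => -1
  | (index, char) :: rest, stack =>
    if (stack.length : Int) = number then index
    else if char ∈ stack then
      getMarkerLoopA number rest
        (PySem.List.slice stack (some (((PySem.List.index? stack char).getD 0 : Int) + 1)) none
          ++ [char])
    else getMarkerLoopA number rest (stack ++ [char])

def get_marker (stream : String) (number : Int) : Int :=
  getMarkerLoopA number (PySem.List.enumerate stream.toList 0) []

-- ===== PORT B =====
-- B's loop, carrying the window start and the dict of last-seen indices
def getMarkerLoopB (number : Int) : List (Int × Char) → Int → PySem.Dict Char Int → Int
  | [], _, _ => -1
  | (index, char) :: rest, start, last =>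
    if index - start = number then index
    else
      let prev := last.getD char (-1)
      let start' := if prev ≥ start then prev + 1 else start
      getMarkerLoopB number rest start' (last.insert char index)

def get_marker_alt (stream : String) (number : Int) : Int :=
  getMarkerLoopB number (PySem.List.enumerate stream.toList 0) 0 PySem.Dict.empty

-- ===== PRECONDITION & SPEC =====
def Spec_get_marker (stream : String) (number : Int) (out : Int) : Prop := out = get_marker_alt stream number
instance (stream : String) (number : Int) (out : Int) : Decidable (Spec_get_marker stream number out) := by unfold Spec_get_marker; infer_instance

-- ===== CLAIM (what is proved, stated in full; the proofs are below) =====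
def Claim_equal_get_marker : Prop := ∀ (stream : String) (number : Int), Dom_get_marker stream number → Spec_get_marker stream number (get_marker stream number)

-- ===== LEMMAS AND PROOFS =====

-- the invariant relating A's stack to B's (start, last) after processing the first chars,
-- i being the next index: the stack is the current distinct window, last records last-seen indices
def GMInv (i start : Int) (stack : List Char) (last : PySem.Dict Char Int) : Prop :=
  stack.Nodup ∧ 0 ≤ start ∧ start + stack.length = i ∧
  (∀ (k : Nat) (hk : k < stack.length), last.getD stack[k] (-1) = start + k) ∧
  (∀ c : Char, c ∉ stack → last.getD c (-1) < start)

theorem gm_loops_eq (number : Int) (cs : List Char) :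
    ∀ (i start : Int) (stack : List Char) (last : PySem.Dict Char Int),
      GMInv i start stack last →
      getMarkerLoopA number (PySem.List.enumerate cs i) stack
        = getMarkerLoopB number (PySem.List.enumerate cs i) start last := by
  induction cs with
  | nil => intro i start stack last _; simp [PySem.List.enumerate_nil, getMarkerLoopA, getMarkerLoopB]
  | cons c cs ih =>
    intro i start stack last hinv
    obtain ⟨hnd, hstart, hlen, hidx, hout⟩ := hinv
    rw [PySem.List.enumerate_cons]
    simp only [getMarkerLoopA, getMarkerLoopB]
    have hcond : ((stack.length : Int) = number) ↔ (i - start = number) := by omega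
    by_cases hn : (stack.length : Int) = number
    · rw [if_pos hn, if_pos (hcond.mp hn)]
    · rw [if_neg hn, if_neg (fun h => hn (hcond.mpr h))]
      by_cases hmem : c ∈ stack
      · rw [if_pos hmem]
        -- c occurs in the stack at a unique position k
        obtain ⟨k, hk⟩ : ∃ k, PySem.List.index? stack c = some k := by
          rcases h : PySem.List.index? stack c with _ | k
          · exact absurd hmem ((PySem.List.index?_eq_none_iff stack c).mp h)
          · exact ⟨k, rfl⟩
        obtain ⟨hklt, hkc, _⟩ := PySem.List.getElem_of_index?_eq_some hk
        have hprev : last.getD c (-1) = start + k := by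
          have := hidx k hklt; rwa [hkc] at this
        have hge : last.getD c (-1) ≥ start := by omega
        rw [hk]
        have hslice : PySem.List.slice stack (some (((k : Nat) : Int) + 1)) none
            = stack.drop (k + 1) := by
          have : ((k : Nat) : Int) + 1 = (((k + 1 : Nat)) : Int) := by push_cast; ring
          rw [this, PySem.List.slice_from_natCast]
        simp only [Option.getD_some, hslice]
        simp only [hprev, if_pos, ge_iff_le, le_add_iff_nonneg_right, Int.natCast_nonneg]
        -- c does not occur in the dropped tail
        have hnotdrop : c ∉ stack.drop (k + 1) := by
          intro hcd
          obtain ⟨j', hj', hjc'⟩ := List.getElem_of_mem hcd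
          rw [List.getElem_drop] at hjc'
          have h2 : stack[k + 1 + j']'(by simp at hj'; omega) = stack[k]'hklt := by
            rw [hjc', hkc]
          have : k + 1 + j' = k := (List.Nodup.getElem_inj_iff hnd).mp h2
          omega
        apply ih
        refine ⟨?_, by omega, ?_, ?_, ?_⟩
        · exact List.Nodup.append (hnd.sublist (List.drop_sublist _ _)) (List.nodup_singleton c)
            (fun a ha hb => by simp at hb; exact hnotdrop (hb ▸ ha))
        · simp only [List.length_append, List.length_drop, List.length_singleton]
          push_cast; omega
        · intro k' hk'
          simp only [List.length_append, List.length_drop, List.length_singleton] at hk'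
          by_cases hlt : k' < stack.length - (k + 1)
          · have hdl : k' < (stack.drop (k + 1)).length := by simp; omega
            rw [List.getElem_append_left hdl, List.getElem_drop]
            have hmemd : stack[k + 1 + k']'(by omega) ∈ stack.drop (k + 1) := by
              rw [← List.getElem_drop (h := by simpa using hdl)]
              exact List.getElem_mem _
            rw [PySem.Dict.getD_insert, if_neg (fun h => hnotdrop (by rw [← h]; exact hmemd))]
            have := hidx (k + 1 + k') (by omega)
            rw [this]; push_cast; omega
          · have hk'' : k' = stack.length - (k + 1) := by omega
            have hge' : (stack.drop (k + 1)).length ≤ k' := by simp; omega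
            rw [List.getElem_append_right hge']
            simp only [List.length_drop, List.getElem_singleton]
            rw [PySem.Dict.getD_insert, if_pos rfl]
            push_cast [hk'']; omega
        · intro c' hc'
          simp only [List.mem_append, List.mem_singleton, not_or] at hc'
          rw [PySem.Dict.getD_insert, if_neg hc'.2]
          by_cases hcs : c' ∈ stack
          · obtain ⟨j, hj, hjc⟩ := List.getElem_of_mem hcs
            have hgd := hidx j hj
            rw [hjc] at hgd
            have hjk : j < k + 1 := by
              by_contra hge2
              apply hc'.1
              have h1 : j - (k + 1) < (stack.drop (k + 1)).length := by simp; omega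
              have h3 : k + 1 + (j - (k + 1)) = j := by omega
              have h2 : (stack.drop (k + 1))[j - (k + 1)] = c' := by
                rw [List.getElem_drop]; rw [← hjc]; simp [h3]
              exact h2 ▸ List.getElem_mem h1
            have hjne : j ≠ k := fun h => hc'.2 (by rw [← hjc]; subst h; exact hkc)
            rw [hgd]; omega
          · have := hout c' hcs; omega
      · rw [if_neg hmem]
        have hprev : last.getD c (-1) < start := hout c hmem
        rw [if_neg (by omega)]
        apply ih
        refine ⟨?_, hstart, by simp; omega, ?_, ?_⟩
        · exact List.Nodup.append hnd (List.nodup_singleton c) (by simpa using hmem)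
        · intro k hk
          simp only [List.length_append, List.length_singleton] at hk
          by_cases hlt : k < stack.length
          · rw [List.getElem_append_left hlt]
            rw [PySem.Dict.getD_insert]
            rw [if_neg (fun h => hmem (by rw [← h]; exact List.getElem_mem hlt))]
            exact hidx k hlt
          · have hkeq : k = stack.length := by omega
            subst hkeq
            rw [List.getElem_append_right (le_refl _)]
            simp
            omega
        · intro c' hc'
          simp only [List.mem_append, List.mem_singleton, not_or] at hc'
          rw [PySem.Dict.getD_insert, if_neg hc'.2]
          exact hout c' hc'.1

-- ===== VERDICT (by name: the statement is the Claim_ definition above) =====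
theorem get_marker_spec : Claim_equal_get_marker := by
  intro stream number _
  unfold Spec_get_marker get_marker get_marker_alt
  exact gm_loops_eq number stream.toList 0 0 [] PySem.Dict.empty
    ⟨List.nodup_nil, le_refl 0, by simp, by intro k hk; simp at hk, by intro c _; simp⟩
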